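-- pv_equiv track=rewrite | github.com/PTYetro/E.D.P.Y | 自动/autojie.py | calculate_encrypted_password
-- ===== SOURCE A (Python) =====
-- def calculate_encrypted_password(original_password, time_str):
--     """
--     根据输入的时间计算二次加密的密码。
--     :param original_password: 用户输入的初始密码
--     :param time_str: 加密时的时间字符串
--     :return: 二次加密的密码
--     """
--     time_num = int(time_str)
--
--     # 计算 time_num 的两倍
--     time_numx2 = time_num * 2
--
--     # 将初始密码每个字符的 ASCII 转换为字符串
--     original_password_ascii = ''.join([str(ord(c)) for c in original_password])
--
--     # 计算 original_password_ascii 的三倍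
--     original_password_asciix3 = int(original_password_ascii) * 3
--
--     # 计算 add_num
--     add_num = time_numx2 + original_password_asciix3
--
--     # 将 add_num 从末尾开始每两位划分为一组，并倒序排列
--     add_num_str = str(add_num)
--     array_partitioning = [int(add_num_str[i:i+2]) for i in range(0, len(add_num_str), 2)][::-1]
--
--     # 对应 ASCII 值转换为字符
--     char_group = [chr(x) for x in array_partitioning]
--
--     # 插入字符组
--     second_encryption = ""
--     remaining_numbers = str(add_num)
--     index = 0
--
--     for i in range(len(remaining_numbers)):
--         second_encryption += remaining_numbers[i]
--         # 根据位置决定插入字符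
--         if (i + 1) % (index + 1) == 0 and index < len(char_group):
--             second_encryption += char_group[index]
--             index += 1
--
--     # 添加剩余字符（如果有）
--     if index < len(char_group):
--         second_encryption += ''.join(char_group[index:])
--
--     return second_encryption
-- ===== SOURCE B (Python) =====
-- def calculate_encrypted_password(original_password, time_str):
--     add_num = 2 * int(time_str) + 3 * int(''.join(str(ord(c)) for c in original_password))
--     s = str(add_num)
--     chars = []
--     rest = s
--     while rest:
--         chars.append(chr(int(rest[:2])))
--         rest = rest[2:]
--     chars.reverse()
--     return ''.join(d + c for d, c in zip(s, chars)) + s[len(chars):]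
-- ===== Notes on version B (the rewrite author's own statement) =====
-- stated objective: simpler
-- what changed: B replaces A's modular-index insertion loop by a direct zip interleave of the digit string with the char group plus the leftover digit suffix, and builds the two-digit groups by structural recursion on the string instead of an index range.
import Mathlib
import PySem

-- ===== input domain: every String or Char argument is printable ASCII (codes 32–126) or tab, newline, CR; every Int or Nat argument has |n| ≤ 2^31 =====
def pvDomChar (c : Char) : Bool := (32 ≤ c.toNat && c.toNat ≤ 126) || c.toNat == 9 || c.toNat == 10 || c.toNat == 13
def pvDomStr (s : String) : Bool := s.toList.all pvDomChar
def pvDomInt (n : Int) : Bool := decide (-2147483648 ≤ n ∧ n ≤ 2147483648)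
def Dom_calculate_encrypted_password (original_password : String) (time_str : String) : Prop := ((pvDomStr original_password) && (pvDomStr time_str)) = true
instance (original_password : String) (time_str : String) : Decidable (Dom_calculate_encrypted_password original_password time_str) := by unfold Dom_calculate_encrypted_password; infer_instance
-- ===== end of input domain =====

-- B replaces A's modular-index insertion loop by a zip interleave plus suffix, and builds the
-- two-digit groups by structural recursion instead of an index range (objective: simpler).

-- ''.join([str(ord(c)) for c in original_password])  (shared verbatim by both Pythons)
def pvAscii (p : String) : List Char :=
  PySem.Chars.join [] (p.toList.map (fun c => PySem.Int.toChars (c.toNat : Int)))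

-- ===== PORT A =====
-- chr(x) → Char.ofNat x.toNat : exact for 0 ≤ x < 0xD800 (here chunks are 0..99 whenever 0 ≤ add_num, which Pre_ guarantees)
def calculate_encrypted_password (original_password : String) (time_str : String) : String :=
  match PySem.Int.ofStr? time_str with
  | none => ""  -- ValueError, excluded by Pre_
  | some time_num =>
    let time_numx2 := time_num * 2
    match PySem.Int.ofChars? (pvAscii original_password) with
    | none => ""  -- ValueError (empty password), excluded by Pre_
    | some oa =>
      let original_password_asciix3 := oa * 3
      let add_num := time_numx2 + original_password_asciix3
      let add_num_str := PySem.Int.toChars add_num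
      -- [int(add_num_str[i:i+2]) for i in range(0, len(add_num_str), 2)][::-1]
      -- int(chunk) → (ofChars? chunk).getD 0 : exact whenever the chunk parses (it does when 0 ≤ add_num, by Pre_)
      let array_partitioning :=
        ((PySem.List.pyRange 0 (PySem.List.len add_num_str) 2).map
          (fun i => (PySem.Int.ofChars? (PySem.List.slice add_num_str (some i) (some (i + 2)))).getD 0)).reverse
      let char_group := array_partitioning.map (fun x => Char.ofNat x.toNat)
      let st := (PySem.List.enumerate add_num_str 0).foldl
        (fun (st : List Char × Int) ic =>
          let acc := st.1 ++ [ic.2]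
          if PySem.Int.mod (ic.1 + 1) (st.2 + 1) = 0 ∧ st.2 < PySem.List.len char_group
          then (acc ++ [PySem.List.pyGetD char_group st.2 ' '], st.2 + 1)
          else (acc, st.2)) ([], 0)
      let res :=
        if st.2 < PySem.List.len char_group
        then st.1 ++ PySem.Chars.join [] ((PySem.List.slice char_group (some st.2) none).map ([·]))
        else st.1
      String.ofList res

-- ===== PORT B =====
-- the while loop: chars.append(chr(int(rest[:2]))); rest = rest[2:]   (rest[:2]/rest[2:] = take/drop, exact for nonnegative bounds)
def pvChunksB (rest : List Char) : List Char :=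
  match rest with
  | [] => []
  | a :: t => Char.ofNat ((PySem.Int.ofChars? ((a :: t).take 2)).getD 0).toNat :: pvChunksB (t.drop 1)
termination_by rest.length
decreasing_by simp

def calculate_encrypted_password_alt (original_password : String) (time_str : String) : String :=
  match PySem.Int.ofStr? time_str, PySem.Int.ofChars? (pvAscii original_password) with
  | some t, some o =>
    let add_num := 2 * t + 3 * o
    let s := PySem.Int.toChars add_num
    let chars := (pvChunksB s).reverse
    -- ''.join(d + c for d, c in zip(s, chars)) + s[len(chars):]
    String.ofList (PySem.Chars.join [] ((s.zip chars).map (fun p => [p.1, p.2])) ++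
               PySem.List.slice s (some (PySem.List.len chars)) none)
  | _, _ => ""  -- ValueError, excluded by Pre_

-- ===== PRECONDITION & SPEC =====
-- Pre_ excludes exactly the inputs where A raises ValueError: time_str that int() rejects, the empty
-- password (int('') on the empty digit join), and a negative add_num (its '-' chunk makes chr() raise).
def Pre_calculate_encrypted_password (original_password : String) (time_str : String) : Prop :=
  (PySem.Int.ofStr? time_str).isSome = true ∧
  (PySem.Int.ofChars? (pvAscii original_password)).isSome = true ∧
  0 ≤ 2 * (PySem.Int.ofStr? time_str).getD 0 + 3 * (PySem.Int.ofChars? (pvAscii original_password)).getD 0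
instance (original_password : String) (time_str : String) : Decidable (Pre_calculate_encrypted_password original_password time_str) := by unfold Pre_calculate_encrypted_password; infer_instance
def pvWitness_calculate_encrypted_password : String × String := ("a", "0")

def Spec_calculate_encrypted_password (original_password : String) (time_str : String) (out : String) : Prop := out = calculate_encrypted_password_alt original_password time_str
instance (original_password : String) (time_str : String) (out : String) : Decidable (Spec_calculate_encrypted_password original_password time_str out) := by unfold Spec_calculate_encrypted_password; infer_instance

-- ===== CLAIM (what is proved, stated in full; the proofs are below) =====
def Claim_equal_calculate_encrypted_password : Prop := ∀ (original_password : String) (time_str : String), Dom_calculate_encrypted_password original_password time_str → Pre_calculate_encrypted_password original_password time_str → Spec_calculate_encrypted_password original_password time_str (calculate_encrypted_password original_password time_str)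

-- ===== LEMMAS AND PROOFS =====

lemma pv_join_singletons (ls : List (List Char)) : PySem.Chars.join [] ls = ls.flatten := by
  induction ls with
  | nil => rfl
  | cons x xs ih =>
    cases xs with
    | nil => simp [PySem.Chars.join, List.intercalate, List.intersperse]
    | cons y ys =>
      simp only [PySem.Chars.join, List.intercalate, List.intersperse, List.flatten_cons] at *
      simp [ih]

lemma pvChunksB_length_le (ds : List Char) : (pvChunksB ds).length ≤ ds.length := by
  induction ds using pvChunksB.induct with
  | case1 => simp [pvChunksB]
  | case2 a t ih => simp only [pvChunksB, List.length_cons] at *; simp at ih ⊢; omega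

lemma range2 (n : Nat) : PySem.List.pyRange 0 (n:Int) 2 =
    (List.range ((n+1)/2)).map (fun k => ((2*k : Nat):Int)) := by
  rw [PySem.List.pyRange_of_pos 0 (n:Int) (s := 2) (by norm_num)]
  have h1 : (if (0:Int) < n then (((n:Int) - 0 + 2 - 1) / 2).toNat else 0) = (n+1)/2 := by
    split_ifs with h <;> omega
  rw [h1]
  apply List.map_congr_left
  intro k _
  push_cast; ring



lemma pv_chunks_aux (ds : List Char) :
    (List.range ((ds.length+1)/2)).map
      (fun k => Char.ofNat ((PySem.Int.ofChars? (PySem.List.slice ds (some ((2*k:Nat):Int)) (some (((2*k:Nat):Int) + 2)))).getD 0).toNat)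
    = pvChunksB ds := by
  induction ds using pvChunksB.induct with
  | case1 => simp [pvChunksB]
  | case2 a t ih =>
    have hlen : ((a::t).length + 1)/2 = ((t.drop 1).length + 1)/2 + 1 := by
      simp; omega
    rw [hlen, List.range_succ_eq_map, List.map_cons, List.map_map]
    rw [pvChunksB]
    refine congrArg₂ List.cons ?_ ?_
    · have h0 : PySem.List.slice (a::t) (some ((2*0:Nat):Int)) (some (((2*0:Nat):Int)+2)) = (a::t).take 2 := by
        have h := PySem.List.slice_to (xs := a::t) (b := (2:Int)) (by norm_num)
        simpa using h
      rw [h0]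
    · rw [← ih]
      apply List.map_congr_left
      intro k _
      simp only [Function.comp_apply]
      have e1 : ((2*(Nat.succ k):Nat):Int) = ((2*k+2:Nat):Int) := by push_cast; ring
      have e2 : (((2*k+2:Nat):Int) + 2) = ((2*k+2+2:Nat):Int) := by push_cast; ring
      have e2' : ((2*k:Nat):Int) + 2 = ((2*k+2:Nat):Int) := by push_cast; ring
      rw [e1, e2, e2', PySem.List.slice_natCast, PySem.List.slice_natCast]
      have e3 : (2*k+2+2) - (2*k+2) = 2 := by omega
      have e4 : ((2*k:Nat)+2) - (2*k) = 2 := by omega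
      rw [e3, e4]
      have e5 : (a::t).drop (2*k+2) = (t.drop 1).drop (2*k) := by
        rw [List.drop_drop]
        simp [List.drop_succ_cons]
        congr 1; omega
      rw [e5]

lemma pv_chunks_eq (ds : List Char) :
    (((PySem.List.pyRange 0 (PySem.List.len ds) 2).map
        (fun i => (PySem.Int.ofChars? (PySem.List.slice ds (some i) (some (i + 2)))).getD 0)).reverse).map
      (fun x => Char.ofNat x.toNat)
    = (pvChunksB ds).reverse := by
  rw [List.map_reverse, List.map_map]
  congr 1
  rw [PySem.List.len_eq, range2, List.map_map, ← pv_chunks_aux ds]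
  apply List.map_congr_left
  intro k _
  rfl

lemma pv_loopA_sat (cg : List Char) (t : List Char) (j : Int) (acc : List Char) :
    (PySem.List.enumerate t j).foldl
      (fun (st : List Char × Int) ic =>
        if PySem.Int.mod (ic.1 + 1) (st.2 + 1) = 0 ∧ st.2 < PySem.List.len cg
        then (st.1 ++ [ic.2] ++ [PySem.List.pyGetD cg st.2 ' '], st.2 + 1)
        else (st.1 ++ [ic.2], st.2)) (acc, ((cg.length : Nat) : Int))
    = (acc ++ t, ((cg.length : Nat) : Int)) := by
  induction t generalizing j acc with
  | nil => simp [PySem.List.enumerate]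
  | cons d t ih =>
    rw [PySem.List.enumerate_cons, List.foldl_cons]
    have hlt : ¬ (((cg.length : Nat) : Int) < PySem.List.len cg) := by
      rw [PySem.List.len_eq]; omega
    rw [if_neg (by tauto)]
    dsimp only
    rw [ih (j+1) _]
    simp

lemma pv_loopA_eq (cg : List Char) (ds : List Char) (k : Nat) (acc : List Char) (hk : k ≤ cg.length) :
    (PySem.List.enumerate ds (k : Int)).foldl
      (fun (st : List Char × Int) ic =>
        if PySem.Int.mod (ic.1 + 1) (st.2 + 1) = 0 ∧ st.2 < PySem.List.len cg
        then (st.1 ++ [ic.2] ++ [PySem.List.pyGetD cg st.2 ' '], st.2 + 1)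
        else (st.1 ++ [ic.2], st.2)) (acc, (k : Int))
    = (acc ++ (ds.zip (cg.drop k)).flatMap (fun p => [p.1, p.2]) ++ ds.drop (cg.length - k),
       ((k + min ds.length (cg.length - k) : Nat) : Int)) := by
  induction ds generalizing k acc with
  | nil => simp [PySem.List.enumerate]
  | cons d t ih =>
    rw [PySem.List.enumerate_cons, List.foldl_cons]
    have hmod : PySem.Int.mod ((k:Int) + 1) ((k:Int) + 1) = 0 := by
      rw [PySem.Int.mod_eq_zero_iff_dvd]
    by_cases h : k < cg.length
    · have hlt : (k:Int) < PySem.List.len cg := by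
        rw [PySem.List.len_eq]; exact_mod_cast h
      rw [if_pos ⟨hmod, hlt⟩]
      have hidx : ((k:Int) + 1) = ((k+1 : Nat) : Int) := by push_cast; ring
      rw [hidx, ih (k+1) _ (by omega)]
      have hget : PySem.List.pyGetD cg (k:Int) ' ' = cg[k] := by
        rw [PySem.List.pyGetD_natCast]
        exact List.getD_eq_getElem cg ' ' h
      have hdropk : cg.drop k = cg[k] :: cg.drop (k+1) := (List.getElem_cons_drop h).symm
      have hsub : cg.length - k = (cg.length - (k+1)) + 1 := by omega
      rw [hdropk, hsub]
      refine Prod.ext ?_ ?_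
      · dsimp only
        rw [hget]
        simp only [List.zip_cons_cons, List.flatMap_cons, List.drop_succ_cons,
          List.cons_append, List.append_assoc, List.nil_append]
      · dsimp only
        congr 1
        simp only [List.length_cons]
        omega
    · have hk' : k = cg.length := by omega
      have hlt : ¬ ((k:Int) < PySem.List.len cg) := by
        rw [PySem.List.len_eq]; omega
      rw [if_neg (by tauto)]
      dsimp only
      subst hk'
      rw [pv_loopA_sat]
      simp

lemma pv_loopA_zero (cg : List Char) (ds : List Char) :
    (PySem.List.enumerate ds 0).foldl
      (fun (st : List Char × Int) ic =>
        if PySem.Int.mod (ic.1 + 1) (st.2 + 1) = 0 ∧ st.2 < PySem.List.len cg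
        then (st.1 ++ [ic.2] ++ [PySem.List.pyGetD cg st.2 ' '], st.2 + 1)
        else (st.1 ++ [ic.2], st.2)) ([], 0)
    = ((ds.zip cg).flatMap (fun p => [p.1, p.2]) ++ ds.drop cg.length,
       ((min ds.length cg.length : Nat) : Int)) := by
  have h := pv_loopA_eq cg ds 0 [] (Nat.zero_le _)
  simpa using h

-- ===== VERDICT (by name: the statement is the Claim_ definition above) =====
theorem calculate_encrypted_password_spec : Claim_equal_calculate_encrypted_password := by
  intro p t _ hpre
  obtain ⟨h1, h2, h3⟩ := hpre
  unfold Spec_calculate_encrypted_password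
  cases hts : PySem.Int.ofStr? t with
  | none => rw [hts] at h1; simp at h1
  | some tn =>
  cases hoa : PySem.Int.ofChars? (pvAscii p) with
  | none => rw [hoa] at h2; simp at h2
  | some oa =>
  simp only [calculate_encrypted_password, calculate_encrypted_password_alt, hts, hoa]
  have hadd : tn * 2 + oa * 3 = 2 * tn + 3 * oa := by ring
  rw [hadd]
  set s := PySem.Int.toChars (2 * tn + 3 * oa) with hs
  rw [pv_chunks_eq s]
  set cg := (pvChunksB s).reverse with hcg
  have hcgle : cg.length ≤ s.length := by
    rw [hcg, List.length_reverse]; exact pvChunksB_length_le s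
  rw [pv_loopA_zero cg s]
  have hmin : min s.length cg.length = cg.length := by omega
  rw [hmin]
  have hnot : ¬ (((cg.length : Nat) : Int) < PySem.List.len cg) := by
    rw [PySem.List.len_eq]; omega
  rw [if_neg hnot]
  rw [pv_join_singletons, ← List.flatMap_def]
  have hslice : PySem.List.slice s (some (PySem.List.len cg)) none = s.drop cg.length := by
    rw [PySem.List.len_eq]; exact PySem.List.slice_from_natCast s cg.length
  rw [hslice]
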